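-- pv_equiv track=rewrite | github.com/haradhansharma/mag | idback/backend/common/management/commands/seed_db.py | _split_top_level_objects
-- ===== SOURCE A (Python) =====
-- def _split_top_level_objects(text):
--     """Split text into top-level {}-delimited objects, respecting strings."""
--     objects = []
--     depth = 0
--     start = None
--     i = 0
--     n = len(text)
--     while i < n:
--         ch = text[i]
--         # Handle string delimiters
--         if ch in ('"', "'", "`"):
--             quote = ch
--             i += 1
--             while i < n:
--                 c2 = text[i]
--                 if c2 == "\\":
--                     i += 2
--                     continue
--                 if c2 == quote:
--                     break
--                 i += 1
--             i += 1
--             continue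
--         if ch == "{":
--             if depth == 0:
--                 start = i
--             depth += 1
--         elif ch == "}":
--             depth -= 1
--             if depth == 0 and start is not None:
--                 objects.append(text[start : i + 1])
--                 start = None
--         i += 1
--     return objects
-- ===== SOURCE B (Python) =====
-- def _split_top_level_objects(text):
--     """Split text into top-level {}-delimited objects, respecting strings."""
--     objects = []
--     depth = 0
--     capturing = False
--     buf = []
--     in_string = False
--     quote = ''
--     escape = False
--     for ch in text:
--         if capturing:
--             buf.append(ch)
--         if escape:
--             escape = False
--         elif in_string:
--             if ch == '\\':
--                 escape = True
--             elif ch == quote: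
--                 in_string = False
--         elif ch in '"\'`':
--             in_string = True
--             quote = ch
--         elif ch == '{':
--             if depth == 0:
--                 capturing = True
--                 buf = [ch]
--             depth += 1
--         elif ch == '}':
--             depth -= 1
--             if depth == 0 and capturing:
--                 objects.append(''.join(buf))
--                 capturing = False
--     return objects
-- ===== Notes on version B (the rewrite author's own statement) =====
-- stated objective: alternative
-- what changed: Replaced A's index-jumping scanner (nested string-consuming while-loop with i+=2 escape jumps and slicing by a recorded start index) with a single uniform one-character-per-step state machine using in_string/quote/escape flags and an accumulated character buffer joined on close.
import Mathlib
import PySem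

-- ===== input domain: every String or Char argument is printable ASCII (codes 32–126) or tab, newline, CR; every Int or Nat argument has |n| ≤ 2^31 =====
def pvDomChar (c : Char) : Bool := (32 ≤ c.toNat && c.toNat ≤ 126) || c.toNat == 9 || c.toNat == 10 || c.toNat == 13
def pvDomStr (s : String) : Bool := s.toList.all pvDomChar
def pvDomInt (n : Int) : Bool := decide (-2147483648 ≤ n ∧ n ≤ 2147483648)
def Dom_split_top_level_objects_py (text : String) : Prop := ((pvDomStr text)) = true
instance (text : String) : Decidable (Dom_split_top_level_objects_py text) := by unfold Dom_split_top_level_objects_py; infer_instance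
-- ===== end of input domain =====

-- B replaces A's index-jumping scanner (nested string-consuming loop, i+=2 escape jumps,
-- slice by recorded start index) with a single uniform one-char-per-step state machine
-- (in_string/escape flags and an accumulated buffer); objective: alternative decomposition.

-- ===== PORT A =====
-- inner 'while' loop of A: scans from index i for the closing quote, i+=2 on backslash
def innerA (l : List Char) (q : Char) (i : Nat) : Nat :=
  if _h : i < l.length then
    if l[i] = '\\' then innerA l q (i + 2)
    else if l[i] = q then i
    else innerA l q (i + 1)
  else i
termination_by l.length - i

-- needed by outerA's termination (the jump past a string strictly increases i)
theorem innerA_ge (l : List Char) (q : Char) (i : Nat) : i ≤ innerA l q i := by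
  unfold innerA
  split
  · split
    · exact le_trans (by omega) (innerA_ge l q (i + 2))
    · split
      · exact le_refl i
      · exact le_trans (by omega) (innerA_ge l q (i + 1))
  · exact le_refl i
termination_by l.length - i

-- outer 'while' loop of A
def outerA (l : List Char) (i : Nat) (depth : Int) (start : Option Nat)
    (objects : List String) : List String :=
  if h : i < l.length then
    if l[i] = '"' ∨ l[i] = '\'' ∨ l[i] = '`' then
      outerA l (innerA l l[i] (i + 1) + 1) depth start objects
    else if l[i] = '{' then
      outerA l (i + 1) (depth + 1) (if depth = 0 then some i else start) objects
    else if l[i] = '}' then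
      match start with
      | some s =>
          if depth - 1 = 0 then
            outerA l (i + 1) (depth - 1) none
              (objects ++ [String.ofList (PySem.List.slice l (some (s : Int)) (some ((i : Int) + 1)))])
          else outerA l (i + 1) (depth - 1) (some s) objects
      | none => outerA l (i + 1) (depth - 1) none objects
    else outerA l (i + 1) depth start objects
  else objects
termination_by l.length - i
decreasing_by
  · have := innerA_ge l l[i] (i + 1); omega
  all_goals omega

def split_top_level_objects_py (text : String) : List String :=
  outerA text.toList 0 0 none []

-- ===== PORT B =====
structure BSt where
  depth : Int
  capturing : Bool
  buf : List Char
  inString : Bool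
  quote : Char
  escape : Bool
  objects : List String
deriving Repr, DecidableEq

def stepB (st : BSt) (ch : Char) : BSt :=
  let st1 := if st.capturing then { st with buf := st.buf ++ [ch] } else st
  if st1.escape then { st1 with escape := false }
  else if st1.inString then
    if ch = '\\' then { st1 with escape := true }
    else if ch = st1.quote then { st1 with inString := false }
    else st1
  else if ch = '"' ∨ ch = '\'' ∨ ch = '`' then
    { st1 with inString := true, quote := ch }
  else if ch = '{' then
    if st1.depth = 0 then { st1 with capturing := true, buf := [ch], depth := st1.depth + 1 }
    else { st1 with depth := st1.depth + 1 }
  else if ch = '}' then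
    let st2 := { st1 with depth := st1.depth - 1 }
    if st2.depth = 0 ∧ st2.capturing then
      { st2 with objects := st2.objects ++ [String.ofList st2.buf], capturing := false }
    else st2
  else st1

def split_top_level_objects_py_alt (text : String) : List String :=
  (text.toList.foldl stepB ⟨0, false, [], false, ' ', false, []⟩).objects

-- ===== PRECONDITION & SPEC =====
def Spec_split_top_level_objects_py (text : String) (out : List String) : Prop := out = split_top_level_objects_py_alt text
instance (text : String) (out : List String) : Decidable (Spec_split_top_level_objects_py text out) := by unfold Spec_split_top_level_objects_py; infer_instance

-- ===== CLAIM (what is proved, stated in full; the proofs are below) =====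
def Claim_equal_split_top_level_objects_py : Prop := ∀ (text : String), Dom_split_top_level_objects_py text → Spec_split_top_level_objects_py text (split_top_level_objects_py text)

-- ===== LEMMAS AND PROOFS =====

theorem stepB_escape (d : Int) (c : Bool) (buf : List Char) (s : Bool) (q : Char) (acc : List String) (ch : Char) :
    stepB ⟨d, c, buf, s, q, true, acc⟩ ch = ⟨d, c, if c then buf ++ [ch] else buf, s, q, false, acc⟩ := by
  cases c <;> simp [stepB]

theorem stepB_string_bs (d : Int) (c : Bool) (buf : List Char) (q : Char) (acc : List String) :
    stepB ⟨d, c, buf, true, q, false, acc⟩ '\\' = ⟨d, c, if c then buf ++ ['\\'] else buf, true, q, true, acc⟩ := by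
  cases c <;> simp [stepB]

theorem stepB_string_close (d : Int) (c : Bool) (buf : List Char) (q : Char) (acc : List String) (hq : q ≠ '\\') :
    stepB ⟨d, c, buf, true, q, false, acc⟩ q = ⟨d, c, if c then buf ++ [q] else buf, false, q, false, acc⟩ := by
  cases c <;> simp [stepB, hq]

theorem stepB_string_other (d : Int) (c : Bool) (buf : List Char) (q : Char) (acc : List String) (ch : Char)
    (h1 : ch ≠ '\\') (h2 : ch ≠ q) :
    stepB ⟨d, c, buf, true, q, false, acc⟩ ch = ⟨d, c, if c then buf ++ [ch] else buf, true, q, false, acc⟩ := by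
  cases c <;> simp [stepB, h1, h2]

theorem stepB_quote (d : Int) (c : Bool) (buf : List Char) (q : Char) (acc : List String) (ch : Char)
    (h : ch = '"' ∨ ch = '\'' ∨ ch = '`') :
    stepB ⟨d, c, buf, false, q, false, acc⟩ ch = ⟨d, c, if c then buf ++ [ch] else buf, true, ch, false, acc⟩ := by
  cases c <;> simp [stepB, h]

theorem stepB_open0 (c : Bool) (buf : List Char) (q : Char) (acc : List String) :
    stepB ⟨0, c, buf, false, q, false, acc⟩ '{' = ⟨1, true, ['{'], false, q, false, acc⟩ := by
  cases c <;> simp [stepB]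

theorem stepB_open (d : Int) (c : Bool) (buf : List Char) (q : Char) (acc : List String) (hd : d ≠ 0) :
    stepB ⟨d, c, buf, false, q, false, acc⟩ '{' = ⟨d + 1, c, if c then buf ++ ['{'] else buf, false, q, false, acc⟩ := by
  cases c <;> simp [stepB, hd]

theorem stepB_close_hit (d : Int) (buf : List Char) (q : Char) (acc : List String) (hd : d - 1 = 0) :
    stepB ⟨d, true, buf, false, q, false, acc⟩ '}' =
      ⟨d - 1, false, buf ++ ['}'], false, q, false, acc ++ [String.ofList (buf ++ ['}'])]⟩ := by
  simp [stepB, hd]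

theorem stepB_close_miss (d : Int) (c : Bool) (buf : List Char) (q : Char) (acc : List String)
    (h : ¬ (d - 1 = 0 ∧ c = true)) :
    stepB ⟨d, c, buf, false, q, false, acc⟩ '}' = ⟨d - 1, c, if c then buf ++ ['}'] else buf, false, q, false, acc⟩ := by
  cases c <;> simp_all [stepB]

theorem stepB_other (d : Int) (c : Bool) (buf : List Char) (q : Char) (acc : List String) (ch : Char)
    (h : ¬ (ch = '"' ∨ ch = '\'' ∨ ch = '`')) (h2 : ch ≠ '{') (h3 : ch ≠ '}') :
    stepB ⟨d, c, buf, false, q, false, acc⟩ ch = ⟨d, c, if c then buf ++ [ch] else buf, false, q, false, acc⟩ := by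
  cases c <;> simp [stepB, h, h2, h3]

theorem take_glue {α : Type} (l : List α) (s i m : Nat) (h1 : s ≤ i) (h2 : i ≤ m) :
    (l.drop s).take (i - s) ++ (l.drop i).take (m - i) = (l.drop s).take (m - s) := by
  have : m - s = (i - s) + (m - i) := by omega
  rw [this, List.take_add, List.drop_drop]
  have : s + (i - s) = i := by omega
  rw [this]

theorem take_snoc {α : Type} (l : List α) (s i : Nat) (h1 : s ≤ i) (h2 : i < l.length) :
    (l.drop s).take (i + 1 - s) = (l.drop s).take (i - s) ++ [l[i]] := by
  have h3 : i + 1 - s = (i - s) + 1 := by omega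
  rw [h3, List.take_add, List.drop_drop]
  have h5 : s + (i - s) = i := by omega
  rw [h5, List.drop_eq_getElem_cons h2]
  rfl

theorem sim_inner (l : List Char) (q : Char) (hq : q ≠ '\\') :
    ∀ (k j : Nat) (d : Int) (c : Bool) (buf : List Char) (acc : List String),
      l.length - j ≤ k →
      ((l.drop j).foldl stepB ⟨d, c, buf, true, q, false, acc⟩).objects =
        ((l.drop (innerA l q j + 1)).foldl stepB
          ⟨d, c, if c then buf ++ (l.drop j).take (innerA l q j + 1 - j) else buf,
           false, q, false, acc⟩).objects := by
  intro k
  induction k with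
  | zero =>
    intro j d c buf acc hk
    have hj2 : l.length ≤ innerA l q j + 1 := by have := innerA_ge l q j; omega
    rw [List.drop_eq_nil_of_le (by omega), List.drop_eq_nil_of_le hj2]
    simp [List.foldl]
  | succ k ih =>
    intro j d c buf acc hk
    by_cases hj : j < l.length
    case neg =>
      have hj2 : l.length ≤ innerA l q j + 1 := by have := innerA_ge l q j; omega
      rw [List.drop_eq_nil_of_le (by omega), List.drop_eq_nil_of_le hj2]
      simp [List.foldl]
    case pos =>
    rw [List.drop_eq_getElem_cons hj, List.foldl_cons]
    by_cases hbs : l[j] = '\\'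
    · have hinner : innerA l q j = innerA l q (j + 2) := by
        rw [innerA]; rw [dif_pos hj, if_pos hbs]
      rw [hbs, stepB_string_bs, hinner]
      by_cases hj2 : j + 1 < l.length
      · rw [List.drop_eq_getElem_cons hj2, List.foldl_cons, stepB_escape,
            ih (j + 2) d c _ acc (by omega)]
        have hge := innerA_ge l q (j + 2)
        cases c
        · simp
        · simp only [if_pos]
          rw [show innerA l q (j + 2) + 1 - j = (innerA l q (j + 2) + 1 - (j + 2)) + 1 + 1 by omega,
              List.take_succ_cons, List.take_succ_cons]
          simp
      · -- backslash is the (second-to-)last char: string never closes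
        have hd1 : l.drop (j + 1) = [] := List.drop_eq_nil_of_le (by omega)
        have hi2 : innerA l q (j + 2) = j + 2 := by
          rw [innerA]; rw [dif_neg (by omega)]
        have hd2 : l.drop (innerA l q (j + 2) + 1) = [] := by
          rw [hi2]; exact List.drop_eq_nil_of_le (by omega)
        rw [hd1, hd2]
        simp [List.foldl]
    · by_cases hq2 : l[j] = q
      · have hinner : innerA l q j = j := by
          rw [innerA]; rw [dif_pos hj, if_neg hbs, if_pos hq2]
        rw [hq2, stepB_string_close d c buf q acc hq, hinner]
        cases c
        · simp
        · simp
      · have hinner : innerA l q j = innerA l q (j + 1) := by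
          rw [innerA]; rw [dif_pos hj, if_neg hbs, if_neg hq2]
        rw [stepB_string_other d c buf q acc _ hbs hq2, hinner,
            ih (j + 1) d c _ acc (by omega)]
        have hge := innerA_ge l q (j + 1)
        cases c
        · simp
        · simp only [if_pos]
          rw [show innerA l q (j + 1) + 1 - j = (innerA l q (j + 1) + 1 - (j + 1)) + 1 by omega,
              List.take_succ_cons]
          simp

theorem sim_outer (l : List Char) :
    ∀ (k i : Nat) (d : Int) (start : Option Nat) (acc : List String) (buf : List Char) (q : Char),
      l.length - i ≤ k →
      (∀ s, start = some s → s ≤ i ∧ buf = (l.drop s).take (i - s)) →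
      outerA l i d start acc =
        ((l.drop i).foldl stepB ⟨d, start.isSome, buf, false, q, false, acc⟩).objects := by
  intro k
  induction k with
  | zero =>
    intro i d start acc buf q hk _
    rw [outerA.eq_def, dif_neg (by omega), List.drop_eq_nil_of_le (by omega)]
    simp [List.foldl]
  | succ k ih =>
    intro i d start acc buf q hk hinv
    by_cases hi : i < l.length
    case neg =>
      rw [outerA.eq_def, dif_neg hi, List.drop_eq_nil_of_le (by omega)]
      simp [List.foldl]
    case pos =>
    rw [outerA.eq_def, dif_pos hi, List.drop_eq_getElem_cons hi, List.foldl_cons]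
    by_cases hquote : l[i] = '"' ∨ l[i] = '\'' ∨ l[i] = '`'
    · rw [if_pos hquote, stepB_quote d start.isSome buf q acc l[i] hquote,
          sim_inner l l[i] (by rcases hquote with h | h | h <;> rw [h] <;> decide)
            l.length (i + 1) d start.isSome _ acc (by omega)]
      have hge := innerA_ge l l[i] (i + 1)
      refine ih (innerA l l[i] (i + 1) + 1) d start acc _ l[i] (by omega) ?_
      intro s hs
      obtain ⟨hsle, hbuf⟩ := hinv s hs
      subst hs
      simp only [Option.isSome_some, if_pos]
      refine ⟨by omega, ?_⟩
      rw [hbuf, ← take_glue l s (i + 1) (innerA l l[i] (i + 1) + 1) (by omega) (by omega),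
          ← take_snoc l s i hsle hi]
    · rw [if_neg hquote]
      by_cases hopen : l[i] = '{'
      · rw [if_pos hopen, hopen]
        by_cases hd : d = 0
        · subst hd
          rw [stepB_open0, if_pos rfl]
          have := ih (i + 1) 1 (some i) acc ['{'] q (by omega) ?_
          · simpa using this
          · intro s hs
            cases hs
            refine ⟨by omega, ?_⟩
            rw [List.drop_eq_getElem_cons hi, hopen]
            simp
        · rw [stepB_open (hd := hd), if_neg hd]
          refine ih (i + 1) (d + 1) start acc _ q (by omega) ?_
          intro s hs
          obtain ⟨hsle, hbuf⟩ := hinv s hs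
          subst hs
          simp only [Option.isSome_some, if_pos]
          refine ⟨by omega, ?_⟩
          rw [hbuf, take_snoc l s i hsle hi, hopen]
      · rw [if_neg hopen]
        by_cases hclose : l[i] = '}'
        · rw [if_pos hclose, hclose]
          cases start with
          | some s =>
            obtain ⟨hsle, hbuf⟩ := hinv s rfl
            simp only [Option.isSome_some]
            by_cases hd : d - 1 = 0
            · rw [stepB_close_hit d _ q acc hd, if_pos hd]
              have harg : buf ++ ['}'] = (l.drop s).take (i + 1 - s) := by
                rw [hbuf, take_snoc l s i hsle hi, hclose]
              have hslice : PySem.List.slice l (some (s : Int)) (some ((i : Int) + 1)) =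
                  (l.drop s).take (i + 1 - s) := by
                rw [show ((i : Int) + 1) = ((i + 1 : Nat) : Int) by push_cast; ring,
                    PySem.List.slice_natCast]
              rw [hslice, ← harg]
              have := ih (i + 1) (d - 1) none
                (acc ++ [String.ofList (buf ++ ['}'])]) (buf ++ ['}']) q (by omega)
                (by intro s hs; cases hs)
              simpa using this
            · rw [stepB_close_miss d true _ q acc (by simp [hd]), if_neg hd]
              refine ih (i + 1) (d - 1) (some s) acc _ q (by omega) ?_
              intro s' hs'
              cases hs'
              simp only [if_pos]
              refine ⟨by omega, ?_⟩
              rw [hbuf, take_snoc l s i hsle hi, hclose]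
          | none =>
            simp only [Option.isSome_none]
            rw [stepB_close_miss d false buf q acc (by simp)]
            exact ih (i + 1) (d - 1) none acc buf q (by omega) (by intro s hs; cases hs)
        · rw [if_neg hclose, stepB_other d start.isSome buf q acc l[i] hquote hopen hclose]
          refine ih (i + 1) d start acc _ q (by omega) ?_
          intro s hs
          obtain ⟨hsle, hbuf⟩ := hinv s hs
          subst hs
          simp only [Option.isSome_some, if_pos]
          refine ⟨by omega, ?_⟩
          rw [hbuf, take_snoc l s i hsle hi]

-- ===== VERDICT (by name: the statement is the Claim_ definition above) =====
theorem split_top_level_objects_py_spec : Claim_equal_split_top_level_objects_py := by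
  intro text _
  unfold Spec_split_top_level_objects_py split_top_level_objects_py split_top_level_objects_py_alt
  have := sim_outer text.toList text.toList.length 0 0 none [] [] ' ' (by omega)
    (by intro s hs; cases hs)
  simpa using this
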